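-- pv_equiv track=rewrite | github.com/Guk0/algorithm | BOJ/Silver/2108.py | frequent
-- ===== SOURCE A (Python) =====
-- def frequent(array):
-- 	num_dict = {}
-- 	for i in array:
-- 		try:
-- 			num_dict[i] += 1
-- 		except:
-- 			num_dict[i] = 1
-- 	frequent_dict = {}
-- 	for k, v in num_dict.items():
-- 		try:
-- 			frequent_dict[v].append(k)
-- 		except:
-- 			frequent_dict[v] = [k]
-- 	key = sorted(list(frequent_dict.keys()))[-1]
-- 	return sorted(frequent_dict[key])[1] if len(frequent_dict[key]) > 1 else frequent_dict[key][0]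
-- ===== SOURCE B (Python) =====
-- def frequent(array):
--     # Sort-then-scan: one pass over the sorted array tracking the current run
--     # length, the best run length so far, and the values attaining it (in
--     # increasing order, without any dictionary).
--     best, run, cands = 0, 0, []
--     prev = None
--     for x in sorted(array):
--         run = run + 1 if x == prev else 1
--         prev = x
--         if run > best:
--             best, cands = run, [x]
--         elif run == best:
--             cands.append(x)
--     return cands[1] if len(cands) > 1 else cands[0]
-- ===== Notes on version B (the rewrite author's own statement) =====
-- stated objective: alternative
-- what changed: B replaces A's two dicts (value->count plus the inverted count->values index) with a sort-then-scan: one pass over the sorted array tracks the current run length, the best run so far and the values attaining it, which arrive already in increasing order.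
import Mathlib
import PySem

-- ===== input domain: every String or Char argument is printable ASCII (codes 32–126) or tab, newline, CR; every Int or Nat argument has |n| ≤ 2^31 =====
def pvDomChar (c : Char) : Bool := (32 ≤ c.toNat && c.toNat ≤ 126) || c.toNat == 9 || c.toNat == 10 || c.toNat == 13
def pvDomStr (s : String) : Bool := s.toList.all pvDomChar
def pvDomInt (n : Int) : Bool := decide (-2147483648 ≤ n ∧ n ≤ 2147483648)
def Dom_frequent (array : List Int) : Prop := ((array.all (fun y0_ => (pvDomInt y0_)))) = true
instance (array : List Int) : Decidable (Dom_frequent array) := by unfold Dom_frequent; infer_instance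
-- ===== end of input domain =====

-- B replaces A's two dicts by a sort-then-scan pass over the sorted array (alternative decomposition, same cost).


-- ===== PORT A =====
def frequent (array : List Int) : Int :=
  let num_dict : PySem.Dict Int Int :=
    array.foldl (fun d i => d.modify i 0 (· + 1)) PySem.Dict.empty
  let frequent_dict : PySem.Dict Int (List Int) :=
    num_dict.items.foldl (fun d p => d.modify p.2 [] (· ++ [p.1])) PySem.Dict.empty
  -- sorted(list(keys))[-1] raises IndexError exactly on the empty array (excluded by Pre_);
  -- frequent_dict[key] and the [0]/[1] indexings are KeyError/IndexError-free under Pre_,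
  -- so the .getD defaults below are unreachable there
  let key : Int := (PySem.List.pyGet? (PySem.List.sorted frequent_dict.keys (fun x => x) false) (-1)).getD 0
  let lst : List Int := frequent_dict.getD key []
  if lst.length > 1 then (PySem.List.pyGet? (PySem.List.sorted lst (fun x => x) false) 1).getD 0
  else (PySem.List.pyGet? lst 0).getD 0

-- ===== PORT B =====
-- the body of B's for-loop: state (prev, run, best, cands)
def stepB (st : Option Int × Int × Int × List Int) (x : Int) : Option Int × Int × Int × List Int :=
  let run := if some x == st.1 then st.2.1 + 1 else 1
  if run > st.2.2.1 then (some x, run, run, [x])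
  else if run == st.2.2.1 then (some x, run, st.2.2.1, st.2.2.2 ++ [x])
  else (some x, run, st.2.2.1, st.2.2.2)

def frequent_alt (array : List Int) : Int :=
  let st := (PySem.List.sorted array (fun x => x) false).foldl stepB
      ((none : Option Int), (0 : Int), (0 : Int), ([] : List Int))
  let cands := st.2.2.2
  -- cands[0] raises IndexError exactly on the empty array (excluded by Pre_);
  -- under Pre_ the defaults below are unreachable
  if cands.length > 1 then (PySem.List.pyGet? cands 1).getD 0
  else (PySem.List.pyGet? cands 0).getD 0

-- ===== PRECONDITION & SPEC =====
-- Pre_ excludes only the empty list, on which both Pythons raise IndexError.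
def Pre_frequent (array : List Int) : Prop := array ≠ []
instance (array : List Int) : Decidable (Pre_frequent array) := by unfold Pre_frequent; infer_instance
def pvWitness_frequent : List Int := ([1, 2, 2])

def Spec_frequent (array : List Int) (out : Int) : Prop := out = frequent_alt array
instance (array : List Int) (out : Int) : Decidable (Spec_frequent array out) := by unfold Spec_frequent; infer_instance

-- ===== CLAIM (what is proved, stated in full; the proofs are below) =====
def Claim_equal_frequent : Prop := ∀ (array : List Int), Dom_frequent array → Pre_frequent array → Spec_frequent array (frequent array)

-- ===== LEMMAS AND PROOFS =====

def cntMap (p : List Int) : List Int := (PySem.Set.ofList p).map (fun k => (p.count k : Int))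
def bestOf (p : List Int) : Int := (PySem.List.max? (cntMap p) (fun v => v)).getD 0
def modesOf (p : List Int) : List Int :=
  (PySem.Set.ofList p).filter (fun k => (p.count k : Int) == bestOf p)
def runOf (p : List Int) : Int :=
  match p.getLast? with
  | none => 0
  | some y => (p.count y : Int)
theorem best_unique (p : List Int) (b : Int)
    (hmem : b ∈ cntMap p) (hub : ∀ v ∈ cntMap p, v ≤ b) : bestOf p = b := by
  obtain ⟨m, hm⟩ : ∃ m, PySem.List.max? (cntMap p) (fun v => v) = some m := by
    cases hq : PySem.List.max? (cntMap p) (fun v => v) with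
    | none =>
      have := (PySem.List.max?_eq_none_iff _ _).1 hq
      rw [this] at hmem; cases hmem
    | some m => exact ⟨m, rfl⟩
  unfold bestOf
  rw [hm]; simp only [Option.getD_some]
  have h1 : b ≤ m := PySem.List.max?_isMax hm _ hmem
  have h2 : m ≤ b := hub _ (PySem.List.max?_mem hm)
  omega
theorem pairwise_le_last (l : List Int) (h : l.Pairwise (· ≤ ·)) (hne : l ≠ []) :
    ∀ y ∈ l, y ≤ l.getLast hne := by
  induction l using List.reverseRecOn with
  | nil => exact absurd rfl hne
  | append_singleton q x _ =>
    intro y hy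
    rw [List.getLast_append_singleton]
    rcases List.mem_append.1 hy with h' | h'
    · exact (List.pairwise_append.1 h).2.2 y h' x (by simp)
    · simp only [List.mem_singleton] at h'; omega
theorem le_bestOf (q : List Int) (k : Int) (hk : k ∈ q) : (q.count k : Int) ≤ bestOf q := by
  have hmem : (q.count k : Int) ∈ cntMap q :=
    List.mem_map.2 ⟨k, (PySem.Set.mem_ofList _ _).2 hk, rfl⟩
  obtain ⟨m, hm⟩ : ∃ m, PySem.List.max? (cntMap q) (fun v => v) = some m := by
    cases hq : PySem.List.max? (cntMap q) (fun v => v) with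
    | none =>
      have := (PySem.List.max?_eq_none_iff _ _).1 hq
      rw [this] at hmem; cases hmem
    | some m => exact ⟨m, rfl⟩
  unfold bestOf; rw [hm]; simp only [Option.getD_some]
  exact PySem.List.max?_isMax hm _ hmem
theorem one_le_bestOf (q : List Int) (hq : q ≠ []) : 1 ≤ bestOf q := by
  obtain ⟨a, ha⟩ := List.exists_mem_of_ne_nil q hq
  have h1 : (1 : Int) ≤ (q.count a : Int) := by
    have := List.count_pos_iff.2 ha
    omega
  exact le_trans h1 (le_bestOf q a ha)
theorem ofList_pairwise_lt (p : List Int) (hs : p.Pairwise (· ≤ ·)) :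
    (PySem.Set.ofList p).Pairwise (· < ·) := by
  induction p using List.reverseRecOn with
  | nil => simp [PySem.Set.ofList_nil]
  | append_singleton q x ih =>
    rw [PySem.Set.ofList_append_singleton]
    have hq : q.Pairwise (· ≤ ·) := hs.sublist (by simp)
    have hub : ∀ y ∈ q, y ≤ x := by
      have := (List.pairwise_append.1 hs).2.2
      intro y hy; exact this y hy x (by simp)
    unfold PySem.Set.add
    split_ifs with hc
    · exact ih hq
    · refine List.pairwise_append.2 ⟨ih hq, by simp, ?_⟩
      intro y hy z hz
      simp only [List.mem_singleton] at hz; subst hz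
      have hyq : y ∈ q := (PySem.Set.mem_ofList _ _).1 hy
      have hne : y ≠ z := by
        intro he; subst he
        exact absurd hy (by simpa [PySem.Set.contains] using hc)
      exact lt_of_le_of_ne (hub y hyq) hne
theorem filter_eq_singleton {α : Type} (l : List α) (x : α) (q : α → Bool)
    (hn : l.Nodup) (hx : x ∈ l) (hq : ∀ y ∈ l, q y = true ↔ y = x) :
    l.filter q = [x] := by
  induction l with
  | nil => cases hx
  | cons a t ih =>
    by_cases hax : a = x
    · subst hax
      have hqa : q a = true := (hq a (by simp)).2 rfl
      have : t.filter q = [] := by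
        apply List.filter_eq_nil_iff.2
        intro y hy hyq
        have := (hq y (by simp [hy])).1 hyq
        exact (List.nodup_cons.1 hn).1 (this ▸ hy)
      simp [hqa, this]
    · have hxt : x ∈ t := by
        rcases List.mem_cons.1 hx with h | h
        · exact absurd h.symm hax
        · exact h
      have hqa : q a = false := by
        by_contra hc
        exact hax ((hq a (by simp)).1 (by simpa using hc))
      rw [List.filter_cons_of_neg (by simp [hqa])]
      exact ih (List.nodup_cons.1 hn).2 hxt (fun y hy => hq y (by simp [hy]))

theorem step_eq (q : List Int) (x : Int) (hs : (q ++ [x]).Pairwise (· ≤ ·)) :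
    stepB (q.getLast?, runOf q, bestOf q, modesOf q) x
      = ((q ++ [x]).getLast?, runOf (q ++ [x]), bestOf (q ++ [x]), modesOf (q ++ [x])) := by
  have hub : ∀ y ∈ q, y ≤ x := fun y hy => (List.pairwise_append.1 hs).2.2 y hy x (by simp)
  have hqp : q.Pairwise (· ≤ ·) := hs.sublist (by simp)
  have hcx : (((q ++ [x]).count x : Int)) = (q.count x : Int) + 1 := by
    simp [List.count_append]
  have hcne : ∀ k : Int, k ≠ x → ((q ++ [x]).count k) = q.count k := by
    intro k hk
    simp [List.count_append, List.count_singleton, Ne.symm hk]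
  rcases eq_or_ne q [] with rfl | hqne
  · simp [stepB, runOf, bestOf, cntMap, modesOf, PySem.Set.ofList_cons, PySem.Set.ofList_nil,
      PySem.Set.discard, PySem.List.max?]
  · have hgl : q.getLast? = some (q.getLast hqne) := List.getLast?_eq_some_getLast hqne
    set y := q.getLast hqne with hy
    have hrunq : runOf q = (q.count y : Int) := by simp [runOf, hgl]
    have hrunnew : runOf (q ++ [x]) = ((q ++ [x]).count x : Int) := by
      simp [runOf]
    by_cases hxy : x = y
    · -- x continues the last run; x ∈ q
      have hxq : x ∈ q := hxy ▸ List.getLast_mem hqne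
      have hofl : PySem.Set.ofList (q ++ [x]) = PySem.Set.ofList q := by
        rw [PySem.Set.ofList_append_singleton]
        unfold PySem.Set.add
        rw [if_pos (by simpa [PySem.Set.contains] using hxq)]
      have hbeq : (some x == q.getLast?) = true := by simp [hgl, hxy]
      have hxmem : x ∈ PySem.Set.ofList (q ++ [x]) := by
        rw [hofl]; exact (PySem.Set.mem_ofList _ _).2 hxq
      have hubq : ∀ k ∈ q, k ≠ x → (q.count k : Int) ≤ bestOf q := fun k hk _ => le_bestOf q k hk
      simp only [stepB, hbeq, if_true, hrunq, ← hxy]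
      by_cases hgt : (q.count x : Int) + 1 > bestOf q
      · rw [if_pos (by exact_mod_cast hgt)]
        have hbnew : bestOf (q ++ [x]) = (q.count x : Int) + 1 := by
          apply best_unique
          · exact List.mem_map.2 ⟨x, hxmem, by rw [hcx]⟩
          · intro v hv
            obtain ⟨k, hk, rfl⟩ := List.mem_map.1 hv
            rw [hofl] at hk
            have hkq : k ∈ q := (PySem.Set.mem_ofList _ _).1 hk
            by_cases hkx : k = x
            · subst hkx; rw [hcx]
            · rw [hcne k hkx]
              have := le_bestOf q k hkq
              omega
        have hmodes : modesOf (q ++ [x]) = [x] := by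
          unfold modesOf
          rw [hofl, hbnew]
          apply filter_eq_singleton _ _ _ (PySem.Set.nodup_ofList _)
            ((PySem.Set.mem_ofList _ _).2 hxq)
          intro k hk
          have hkq : k ∈ q := (PySem.Set.mem_ofList _ _).1 hk
          constructor
          · intro hqk
            by_contra hkx
            rw [show ((q ++ [x]).count k : Int) = (q.count k : Int) by rw [hcne k hkx]] at hqk
            have h1 := le_bestOf q k hkq
            have := beq_iff_eq.1 hqk
            omega
          · intro hkx; subst hkx
            simp
        rw [hrunnew, hcx, hbnew, hmodes, List.getLast?_concat]
      · rw [if_neg (by exact_mod_cast hgt)]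
        by_cases heq : (q.count x : Int) + 1 = bestOf q
        · -- run+1 == best: append x
          rw [if_pos (by simp only [beq_iff_eq]; omega)]
          have hbnew : bestOf (q ++ [x]) = bestOf q := by
            apply best_unique
            · exact List.mem_map.2 ⟨x, hxmem, by rw [hcx, heq]⟩
            · intro v hv
              obtain ⟨k, hk, rfl⟩ := List.mem_map.1 hv
              rw [hofl] at hk
              have hkq : k ∈ q := (PySem.Set.mem_ofList _ _).1 hk
              by_cases hkx : k = x
              · subst hkx; rw [hcx, heq]
              · rw [hcne k hkx]; exact le_bestOf q k hkq
          have hmodes : modesOf (q ++ [x]) = modesOf q ++ [x] := by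
            -- decompose ofList q = t ++ [x]
            have hplt : (PySem.Set.ofList q).Pairwise (· < ·) := ofList_pairwise_lt q hqp
            have hone : PySem.Set.ofList q ≠ [] := by
              intro h
              have := (PySem.Set.mem_ofList q x).2 hxq
              rw [h] at this; cases this
            have hlast : (PySem.Set.ofList q).getLast hone = x := by
              have h1 := pairwise_le_last _ (hplt.imp le_of_lt) hone _
                ((PySem.Set.mem_ofList _ _).2 hxq)
              have h2 : (PySem.Set.ofList q).getLast hone ∈ q :=
                (PySem.Set.mem_ofList _ _).1 (List.getLast_mem hone)
              have h3 : (PySem.Set.ofList q).getLast hone ≤ x := by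
                rw [hxy]; exact pairwise_le_last q hqp hqne _ h2
              omega
            obtain ⟨t, ht⟩ : ∃ t, PySem.Set.ofList q = t ++ [x] :=
              ⟨(PySem.Set.ofList q).dropLast, by
                rw [← hlast]; exact (List.dropLast_append_getLast hone).symm⟩
            have htlt : ∀ k ∈ t, k < x := by
              intro k hk
              have := List.pairwise_append.1 (ht ▸ hplt)
              exact this.2.2 k hk x (by simp)
            unfold modesOf
            rw [hofl, hbnew, ht]
            rw [List.filter_append, List.filter_append]
            have hfx_new : List.filter (fun k => ((q ++ [x]).count k : Int) == bestOf q) [x] = [x] := by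
              simp [heq]
            have hfx_old : List.filter (fun k => (q.count k : Int) == bestOf q) [x] = [] := by
              simp only [List.filter_cons, List.filter_nil]
              rw [if_neg]
              simp only [beq_iff_eq]
              omega
            rw [hfx_new, hfx_old, List.append_nil]
            congr 1
            apply List.filter_congr
            intro k hk
            rw [show ((q ++ [x]).count k : Int) = (q.count k : Int) by
              rw [hcne k (ne_of_lt (htlt k hk))]]
          rw [hrunnew, hcx, hbnew, hmodes, List.getLast?_concat, heq]
        · -- run+1 < best: unchanged
          rw [if_neg (by simp only [beq_iff_eq]; omega)]
          have hlt : (q.count x : Int) + 1 < bestOf q := by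
            rcases lt_or_ge ((q.count x : Int) + 1) (bestOf q) with h | h
            · exact h
            · omega
          have hbnew : bestOf (q ++ [x]) = bestOf q := by
            obtain ⟨m, hm⟩ : ∃ m, PySem.List.max? (cntMap q) (fun v => v) = some m := by
              cases hq2 : PySem.List.max? (cntMap q) (fun v => v) with
              | none =>
                have h0 := (PySem.List.max?_eq_none_iff _ _).1 hq2
                have hx' : (q.count x : Int) ∈ cntMap q :=
                  List.mem_map.2 ⟨x, (PySem.Set.mem_ofList _ _).2 hxq, rfl⟩
                rw [h0] at hx'; cases hx'
              | some m => exact ⟨m, rfl⟩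
            have hbm : bestOf q = m := by unfold bestOf; rw [hm]; rfl
            obtain ⟨k0, hk0, hk0e⟩ := List.mem_map.1 (PySem.List.max?_mem hm)
            have hk0q : k0 ∈ q := (PySem.Set.mem_ofList _ _).1 hk0
            have hk0x : k0 ≠ x := by
              intro h; subst h; omega
            apply best_unique
            · refine List.mem_map.2 ⟨k0, by rw [hofl]; exact hk0, ?_⟩
              rw [hcne k0 hk0x, hk0e, hbm]
            · intro v hv
              obtain ⟨k, hk, rfl⟩ := List.mem_map.1 hv
              rw [hofl] at hk
              have hkq : k ∈ q := (PySem.Set.mem_ofList _ _).1 hk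
              by_cases hkx : k = x
              · subst hkx; rw [hcx]; omega
              · rw [hcne k hkx]; exact le_bestOf q k hkq
          have hmodes : modesOf (q ++ [x]) = modesOf q := by
            unfold modesOf
            rw [hofl, hbnew]
            apply List.filter_congr
            intro k hk
            by_cases hkx : k = x
            · subst hkx
              rw [hcx]
              have h1 : ((q.count k : Int) + 1 == bestOf q) = false := by
                rw [beq_eq_false_iff_ne]; omega
              have h2 : ((q.count k : Int) == bestOf q) = false := by
                rw [beq_eq_false_iff_ne]; omega
              rw [h1, h2]
            · rw [hcne k hkx]
          rw [hrunnew, hcx, hbnew, hmodes, List.getLast?_concat]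
    · -- new value: x ∉ q
      have hxnq : x ∉ q := by
        intro hxq
        have h1 : x ≤ y := pairwise_le_last q hqp hqne x hxq
        have h2 : y ≤ x := hub y (List.getLast_mem hqne)
        omega
      have hofl : PySem.Set.ofList (q ++ [x]) = PySem.Set.ofList q ++ [x] := by
        rw [PySem.Set.ofList_append_singleton]
        unfold PySem.Set.add
        rw [if_neg (by
          simp only [PySem.Set.contains]
          intro hc
          exact hxnq ((PySem.Set.mem_ofList _ _).1 (by simpa using hc)))]
      have hbeq : (some x == q.getLast?) = false := by simp [hgl, hxy]
      have hcx1 : ((q ++ [x]).count x : Int) = 1 := by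
        rw [hcx, List.count_eq_zero_of_not_mem hxnq]; simp
      have hble : 1 ≤ bestOf q := one_le_bestOf q hqne
      simp only [stepB, hbeq, if_false, Bool.false_eq_true]
      rw [if_neg (by omega)]
      by_cases heq : (1 : Int) = bestOf q
      · rw [if_pos (by simp only [beq_iff_eq]; omega)]
        have hbnew : bestOf (q ++ [x]) = bestOf q := by
          apply best_unique
          · exact List.mem_map.2 ⟨x, by rw [hofl]; simp, by rw [hcx1, heq]⟩
          · intro v hv
            obtain ⟨k, hk, rfl⟩ := List.mem_map.1 hv
            rw [hofl] at hk
            rcases List.mem_append.1 hk with hk' | hk'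
            · have hkq : k ∈ q := (PySem.Set.mem_ofList _ _).1 hk'
              rw [hcne k (by rintro rfl; exact hxnq hkq)]
              exact le_bestOf q k hkq
            · simp only [List.mem_singleton] at hk'; subst hk'
              rw [hcx1]; omega
        have hmodes : modesOf (q ++ [x]) = modesOf q ++ [x] := by
          unfold modesOf
          rw [hofl, hbnew, List.filter_append]
          congr 1
          · apply List.filter_congr
            intro k hk
            have hkq : k ∈ q := (PySem.Set.mem_ofList _ _).1 hk
            rw [hcne k (by rintro rfl; exact hxnq hkq)]
          · simp only [List.filter_cons, List.filter_nil]
            rw [if_pos (by rw [hcx1]; simp only [beq_iff_eq]; omega)]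
        rw [hrunnew, hcx1, hbnew, hmodes, List.getLast?_concat, heq]
      · have hlt : (1 : Int) < bestOf q := by omega
        rw [if_neg (by simpa using heq)]
        have hbnew : bestOf (q ++ [x]) = bestOf q := by
          apply best_unique
          · obtain ⟨m, hm⟩ : ∃ m, PySem.List.max? (cntMap q) (fun v => v) = some m := by
              cases hq2 : PySem.List.max? (cntMap q) (fun v => v) with
              | none =>
                have h0 := (PySem.List.max?_eq_none_iff _ _).1 hq2
                obtain ⟨a, ha⟩ := List.exists_mem_of_ne_nil q hqne
                have : (q.count a : Int) ∈ cntMap q :=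
                  List.mem_map.2 ⟨a, (PySem.Set.mem_ofList _ _).2 ha, rfl⟩
                rw [h0] at this; cases this
              | some m => exact ⟨m, rfl⟩
            have hbm : bestOf q = m := by unfold bestOf; rw [hm]; rfl
            obtain ⟨k0, hk0, hk0e⟩ := List.mem_map.1 (PySem.List.max?_mem hm)
            have hk0q : k0 ∈ q := (PySem.Set.mem_ofList _ _).1 hk0
            refine List.mem_map.2 ⟨k0, by rw [hofl]; exact List.mem_append_left _ hk0, ?_⟩
            rw [hcne k0 (by rintro rfl; exact hxnq hk0q), hk0e, hbm]
          · intro v hv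
            obtain ⟨k, hk, rfl⟩ := List.mem_map.1 hv
            rw [hofl] at hk
            rcases List.mem_append.1 hk with hk' | hk'
            · have hkq : k ∈ q := (PySem.Set.mem_ofList _ _).1 hk'
              rw [hcne k (by rintro rfl; exact hxnq hkq)]
              exact le_bestOf q k hkq
            · simp only [List.mem_singleton] at hk'; subst hk'
              rw [hcx1]; omega
        have hmodes : modesOf (q ++ [x]) = modesOf q := by
          unfold modesOf
          rw [hofl, hbnew, List.filter_append]
          have hfx : List.filter (fun k => ((q ++ [x]).count k : Int) == bestOf q) [x] = [] := by
            simp only [List.filter_cons, List.filter_nil]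
            rw [if_neg]
            rw [hcx1]
            simp only [beq_iff_eq]
            omega
          rw [hfx, List.append_nil]
          apply List.filter_congr
          intro k hk
          have hkq : k ∈ q := (PySem.Set.mem_ofList _ _).1 hk
          rw [hcne k (by rintro rfl; exact hxnq hkq)]
        rw [hrunnew, hcx1, hbnew, hmodes, List.getLast?_concat]

theorem maxD_perm (l l2 : List Int) (h : l.Perm l2) :
    (PySem.List.max? l (fun v => v)).getD 0 = (PySem.List.max? l2 (fun v => v)).getD 0 := by
  cases hl : PySem.List.max? l (fun v => v) with
  | none =>
    have : l = [] := (PySem.List.max?_eq_none_iff _ _).1 hl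
    subst this
    rw [(PySem.List.max?_eq_none_iff _ _).2 (h.nil_eq).symm]
  | some m =>
    have hl2 : l2 ≠ [] := by
      intro he; subst he
      rw [(PySem.List.max?_eq_none_iff l (fun v => v)).2 h.eq_nil] at hl; exact absurd hl (by simp)
    obtain ⟨m2, hm2⟩ : ∃ m2, PySem.List.max? l2 (fun v => v) = some m2 := by
      cases hq : PySem.List.max? l2 (fun v => v) with
      | none => exact absurd ((PySem.List.max?_eq_none_iff _ _).1 hq) hl2
      | some m2 => exact ⟨m2, rfl⟩
    rw [hm2]
    simp only [Option.getD_some]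
    have h1 : m ≤ m2 := PySem.List.max?_isMax hm2 _ (h.mem_iff.1 (PySem.List.max?_mem hl))
    have h2 : m2 ≤ m := PySem.List.max?_isMax hl _ (h.mem_iff.2 (PySem.List.max?_mem hm2))
    omega

-- A's sorted(...)[-1] over any list with the same members as l2 equals max(l2).
theorem max_last (l l2 : List Int) (hm : ∀ x, x ∈ l ↔ x ∈ l2) (hne : l ≠ []) :
    (PySem.List.pyGet? (PySem.List.sorted l (fun x => x) false) (-1)).getD 0
      = (PySem.List.max? l2 (fun x => x)).getD 0 := by
  have hs : PySem.List.sorted l (fun x => x) false ≠ [] := by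
    simpa [PySem.List.sorted_eq_nil_iff] using hne
  set s := PySem.List.sorted l (fun x => x) false with hsdef
  have hl2 : l2 ≠ [] := by
    cases l with
    | nil => exact absurd rfl hne
    | cons a t =>
      intro h; subst h
      exact absurd ((hm a).1 (List.mem_cons_self)) (List.not_mem_nil)
  obtain ⟨m, hmax⟩ : ∃ m, PySem.List.max? l2 (fun x => x) = some m := by
    cases hq : PySem.List.max? l2 (fun x => x) with
    | none => exact absurd ((PySem.List.max?_eq_none_iff _ _).1 hq) hl2
    | some m => exact ⟨m, rfl⟩
  rw [PySem.List.pyGet?_neg_one, hmax]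
  rw [List.getLast?_eq_some_getLast hs]
  simp only [Option.getD_some]
  have hlast_mem : s.getLast hs ∈ s := List.getLast_mem hs
  have h1 : s.getLast hs ≤ m :=
    PySem.List.max?_isMax hmax _ ((hm _).1 ((PySem.List.mem_sorted _ _ _ _).1 hlast_mem))
  have hm_mem : m ∈ s := (PySem.List.mem_sorted _ _ _ _).2 ((hm m).2 (PySem.List.max?_mem hmax))
  have hlen : (PySem.List.sorted l (fun x => x) false).length = s.length := by rw [hsdef]
  obtain ⟨p, hp, hpe⟩ := List.mem_iff_getElem.1 hm_mem
  have h2 : m ≤ s.getLast hs := by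
    rw [List.getLast_eq_getElem]
    calc m = s[p] := hpe.symm
      _ ≤ s[s.length - 1] := PySem.List.sorted_id_getElem_mono (xs := l) (by omega) (by omega)
  omega

-- A's grouping loop, looked up at a count c, yields exactly the keys whose count is c, in items order.
theorem fd_getD (items : List (Int × Int)) (c : Int) :
    ((items.foldl (fun d p => d.modify p.2 [] (· ++ [p.1])) PySem.Dict.empty).getD c [])
      = (items.filter (fun p => p.2 == c)).map (·.1) := by
  have h := PySem.Dict.getD_foldl_modify_append (l := items.map (fun p => (p.2, p.1)))
      (d := (PySem.Dict.empty : PySem.Dict Int (List Int))) (c := c)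
  rw [List.foldl_map] at h
  simpa [List.filter_map, Function.comp] using h

-- The keys of A's grouping dict are the distinct counts, in first-occurrence order.
theorem fd_keys (items : List (Int × Int)) :
    (items.foldl (fun d p => d.modify p.2 [] (· ++ [p.1])) PySem.Dict.empty).keys
      = PySem.Set.ofList (items.map (·.2)) := by
  rw [PySem.Dict.keys_foldl_modify_key]
  simp [PySem.Set.update_nil_left]

theorem fold_inv (p : List Int) (hs : p.Pairwise (· ≤ ·)) :
    p.foldl stepB ((none : Option Int), (0 : Int), (0 : Int), ([] : List Int))
      = (p.getLast?, runOf p, bestOf p, modesOf p) := by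
  induction p using List.reverseRecOn with
  | nil => simp [runOf, bestOf, cntMap, modesOf, PySem.Set.ofList_nil, PySem.List.max?]
  | append_singleton q x ih =>
    rw [List.foldl_append]
    simp only [List.foldl_cons, List.foldl_nil]
    rw [ih (hs.sublist (by simp))]
    exact step_eq q x hs

theorem perm_eq_of_short {α : Type} (l l' : List α) (h : l.Perm l') (hlen : l.length ≤ 1) :
    l = l' := by
  cases l with
  | nil => exact (h.nil_eq)
  | cons a t =>
    cases t with
    | nil => exact (List.perm_singleton.1 h.symm).symm
    | cons b u => simp at hlen

-- ===== VERDICT (by name: the statement is the Claim_ definition above) =====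
theorem frequent_spec : Claim_equal_frequent := by
  intro array _ hpre
  show frequent array = frequent_alt array
  have hpre' : array ≠ [] := hpre
  set s := PySem.List.sorted array (fun x => x) false with hsdef
  have hsp : s.Pairwise (· ≤ ·) := by
    simpa using PySem.List.sorted_pairwise (xs := array) (key := fun x => x)
  have hsperm : s.Perm array := PySem.List.sorted_perm array (fun x => x) false
  have hcnt : ∀ k : Int, s.count k = array.count k := fun k => hsperm.count_eq k
  have hofperm : (PySem.Set.ofList s).Perm (PySem.Set.ofList array) := by
    rw [List.perm_ext_iff_of_nodup (PySem.Set.nodup_ofList _) (PySem.Set.nodup_ofList _)]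
    intro a
    rw [PySem.Set.mem_ofList, PySem.Set.mem_ofList, hsperm.mem_iff]
  have hcm : cntMap s = (PySem.Set.ofList s).map (fun k => (array.count k : Int)) := by
    unfold cntMap
    exact List.map_congr_left (fun k _ => by rw [hcnt k])
  have hcmperm : (cntMap s).Perm (cntMap array) := by
    rw [hcm]
    exact hofperm.map _
  have hbest : bestOf s = bestOf array := maxD_perm _ _ hcmperm
  -- B side reduces to modesOf s
  have hB : frequent_alt array
      = (if (modesOf s).length > 1 then (PySem.List.pyGet? (modesOf s) 1).getD 0
         else (PySem.List.pyGet? (modesOf s) 0).getD 0) := by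
    unfold frequent_alt
    rw [← hsdef, fold_inv s hsp]
  -- A side
  have hvals : (PySem.Dict.counter array).items.map (·.2) = cntMap array := by
    rw [PySem.Dict.items_counter]
    simp [cntMap, List.map_map, Function.comp]
  have hcmne : cntMap array ≠ [] := by
    obtain ⟨a, ha⟩ := List.exists_mem_of_ne_nil array hpre'
    intro h
    have : (array.count a : Int) ∈ cntMap array :=
      List.mem_map.2 ⟨a, (PySem.Set.mem_ofList _ _).2 ha, rfl⟩
    rw [h] at this; cases this
  have hkey : (PySem.List.pyGet? (PySem.List.sorted (PySem.Set.ofList (cntMap array)) (fun x => x) false) (-1)).getD 0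
      = bestOf array := by
    unfold bestOf
    apply max_last
    · exact fun v => PySem.Set.mem_ofList _ _
    · intro h
      obtain ⟨v, hv⟩ := List.exists_mem_of_ne_nil _ hcmne
      have := (PySem.Set.mem_ofList (cntMap array) v).2 hv
      rw [h] at this; cases this
  have hlst : ((PySem.Dict.counter array).items.filter (fun p => p.2 == bestOf array)).map (·.1)
      = (PySem.Set.ofList array).filter (fun k => (array.count k : Int) == bestOf array) := by
    rw [PySem.Dict.items_counter, List.filter_map, List.map_map]
    simp only [Function.comp_def]
    simp
  set F := (PySem.Set.ofList array).filter (fun k => (array.count k : Int) == bestOf array) with hF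
  have hmodes : modesOf s = (PySem.Set.ofList s).filter (fun k => (array.count k : Int) == bestOf array) := by
    unfold modesOf
    apply List.filter_congr
    intro k _
    rw [hcnt k, hbest]
  have hmperm : (modesOf s).Perm F := by
    rw [hmodes, hF]
    exact hofperm.filter _
  have hmlt : (modesOf s).Pairwise (· < ·) := by
    unfold modesOf
    exact (ofList_pairwise_lt s hsp).filter _
  have hA : frequent array
      = (if F.length > 1 then (PySem.List.pyGet? (PySem.List.sorted F (fun x => x) false) 1).getD 0
         else (PySem.List.pyGet? F 0).getD 0) := by
    simp only [frequent]
    rw [← PySem.Dict.counter_eq_foldl]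
    rw [fd_keys, fd_getD, hvals, hkey, hlst]
  rw [hA, hB]
  have hlen : F.length = (modesOf s).length := hmperm.length_eq.symm
  by_cases hgt : (modesOf s).length > 1
  · rw [if_pos (by omega), if_pos hgt]
    rw [PySem.List.sorted_eq_of_perm_of_pairwise_lt F (modesOf s) (fun x => x) hmperm
      (by simpa using hmlt)]
  · rw [if_neg (by omega), if_neg hgt]
    rw [perm_eq_of_short _ _ hmperm (by omega)]
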